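-- pv_equiv track=rewrite | github.com/hrishikeshtak/Coding_Practises_Solutions | hackerrank/si/si-triple-trouble.py | triple_trouble
-- ===== SOURCE A (Python) =====
-- def triple_trouble(arr):
--     res = 0
--     for bit in range(0, 32):
--         ans = 0
--         for i in arr:
--             # check bit is set or not
--             if (i & (1 << bit)) != 0:
--                 ans += 1
--         if ans % 3 != 0:
--             res |= (1 << bit)
--     return res
-- ===== SOURCE B (Python) =====
-- def triple_trouble(arr):
--     ones, twos = 0, 0
--     for num in arr:
--         num &= 0xFFFFFFFF
--         twos |= ones & num
--         ones ^= num
--         common = ~(ones & twos)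
--         ones &= common
--         twos &= common
--     return (ones | twos) & 0xFFFFFFFF
-- ===== Notes on version B (the rewrite author's own statement) =====
-- stated objective: faster
-- what changed: Replaces A's 32 counting passes (one per bit position, counting set bits mod 3 and assembling the result bit by bit) with the classic single-pass ones/twos bitmask accumulator over 32-bit-masked elements, returning ones|twos.
import Mathlib
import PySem

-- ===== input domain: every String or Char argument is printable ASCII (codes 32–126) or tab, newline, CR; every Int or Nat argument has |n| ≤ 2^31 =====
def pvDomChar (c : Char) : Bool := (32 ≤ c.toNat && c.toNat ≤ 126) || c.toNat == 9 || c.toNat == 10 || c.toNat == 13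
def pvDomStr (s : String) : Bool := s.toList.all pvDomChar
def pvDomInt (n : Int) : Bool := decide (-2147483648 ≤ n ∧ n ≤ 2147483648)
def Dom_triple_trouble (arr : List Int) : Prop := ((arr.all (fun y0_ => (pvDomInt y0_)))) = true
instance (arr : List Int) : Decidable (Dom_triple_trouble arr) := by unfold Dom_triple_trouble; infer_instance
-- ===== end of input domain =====

-- B replaces A's 32 per-bit counting passes with one pass keeping the classic ones/twos
-- bitmask accumulators (objective: alternative single-pass algorithm, same exact result).


-- ===== PORT A =====
-- range(0, 32) enumerates the nonnegative bit positions 0..31, ported as List.range 32;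
-- i & (1 << bit) is PySem.Int.band i (1 <<< bit); ans % 3 is PySem.Int.mod (Python-exact).
def triple_trouble (arr : List Int) : Int :=
  (List.range 32).foldl (fun res (bit : Nat) =>
    let ans := arr.foldl (fun ans i =>
      if PySem.Int.band i ((1 : Int) <<< bit) ≠ 0 then ans + 1 else ans) (0 : Int)
    if PySem.Int.mod ans 3 ≠ 0 then PySem.Int.bor res ((1 : Int) <<< bit) else res) 0

-- ===== PORT B =====
-- transliteration of Source B: single pass with (ones, twos) state; Python's ~x is Int.not x.
def triple_trouble_alt (arr : List Int) : Int :=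
  let st := arr.foldl (fun (st : Int × Int) i =>
    let num := PySem.Int.band i 4294967295
    let twos := PySem.Int.bor st.2 (PySem.Int.band st.1 num)
    let ones := PySem.Int.bxor st.1 num
    let common := Int.not (PySem.Int.band ones twos)
    (PySem.Int.band ones common, PySem.Int.band twos common)) ((0 : Int), (0 : Int))
  PySem.Int.band (PySem.Int.bor st.1 st.2) 4294967295

-- ===== PRECONDITION & SPEC =====
def Spec_triple_trouble (arr : List Int) (out : Int) : Prop := out = triple_trouble_alt arr
instance (arr : List Int) (out : Int) : Decidable (Spec_triple_trouble arr out) := by unfold Spec_triple_trouble; infer_instance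

-- ===== CLAIM (what is proved, stated in full; the proofs are below) =====
def Claim_equal_triple_trouble : Prop := ∀ (arr : List Int), Dom_triple_trouble arr → Spec_triple_trouble arr (triple_trouble arr)

-- ===== LEMMAS AND PROOFS =====

-- the low 32 bits of a Python int, as a Nat
def pvMaskN (i : Int) : Nat := (PySem.Int.band i 4294967295).toNat

-- the number of elements of arr whose bit b is set (reading each element's low 32 bits)
def pvCnt (arr : List Int) (b : Nat) : Nat := arr.countP (fun i => (pvMaskN i).testBit b)

lemma pv_and_mod_two (x y : Nat) : (x &&& y) % 2 = x % 2 * (y % 2) := by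
  have hx := Nat.testBit_and x y 0
  simp [Nat.testBit] at hx
  rcases Nat.mod_two_eq_zero_or_one x with h | h <;>
    rcases Nat.mod_two_eq_zero_or_one y with h2 | h2 <;>
      rcases Nat.mod_two_eq_zero_or_one (x &&& y) with h3 | h3 <;> simp_all

lemma pv_and_add_xor (x y : Nat) : (x &&& y) + (x ^^^ (x &&& y)) = x := by
  induction x using Nat.strong_induction_on generalizing y with
  | _ x ih =>
    rcases Nat.eq_zero_or_pos x with hx | hx
    · simp [hx]
    · have h2 : x / 2 < x := Nat.div_lt_self hx (by norm_num)
      have IH := ih (x / 2) h2 (y / 2)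
      have ha : (x &&& y) / 2 = x / 2 &&& y / 2 := Nat.and_div_two
      have hb : (x ^^^ (x &&& y)) / 2 = x / 2 ^^^ (x &&& y) / 2 := Nat.xor_div_two
      have ham : (x &&& y) % 2 = x % 2 * (y % 2) := pv_and_mod_two x y
      have hbm : (x ^^^ (x &&& y)) % 2 = (x + (x &&& y)) % 2 := Nat.xor_mod_two_eq
      rw [← ha, ← hb] at IH
      have e1 := Nat.div_add_mod (x &&& y) 2
      have e2 := Nat.div_add_mod (x ^^^ (x &&& y)) 2
      have e3 := Nat.div_add_mod x 2
      rcases Nat.mod_two_eq_zero_or_one x with h | h <;>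
        rcases Nat.mod_two_eq_zero_or_one y with h2' | h2' <;>
          rw [h, h2'] at ham <;> norm_num at ham <;> omega

lemma pv_sub_and_testBit (x y b : Nat) :
    (x - (x &&& y)).testBit b = (x.testBit b && !(y.testBit b)) := by
  have h : x - (x &&& y) = x ^^^ (x &&& y) := by
    have := pv_and_add_xor x y; omega
  rw [h, Nat.testBit_xor, Nat.testBit_and]
  cases x.testBit b <;> cases y.testBit b <;> rfl

lemma pv_not_natCast (y : Nat) : Int.not (y : Int) = -(y : Int) - 1 := by
  cases h : (y : Int) <;> simp [Int.not] <;> omega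

lemma pv_band_not (x y : Nat) :
    PySem.Int.band (x : Int) (Int.not (y : Int)) = ((x - (x &&& y) : Nat) : Int) := by
  rw [pv_not_natCast]
  have h1 : ¬ (0 ≤ -(y : Int) - 1) := by omega
  simp [PySem.Int.band, h1]
  congr 1 <;> omega

lemma pv_band_mask (i : Int) : PySem.Int.band i 4294967295 = ((pvMaskN i : Nat) : Int) := by
  have h : 0 ≤ PySem.Int.band i 4294967295 := by
    rw [PySem.Int.band_comm]
    exact PySem.Int.band_nonneg_of_nonneg_left i (by norm_num)
  unfold pvMaskN
  omega

lemma pv_shift_one (b : Nat) : (1 : Int) <<< b = ((2 ^ b : Nat) : Int) := by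
  have h := Int.shiftLeft_natCast 1 b
  rw [Int.shiftLeft_natCast_right] at h
  simpa [Nat.shiftLeft_eq] using h

lemma pv_maskN_testBit (i : Int) (b : Nat) (hb : b < 32) :
    (pvMaskN i).testBit b = decide (PySem.Int.band i ((1 : Int) <<< b) ≠ 0) := by
  unfold pvMaskN
  rw [pv_shift_one]
  rcases i with n | n
  · simp only [Int.ofNat_eq_natCast]
    have h2 : PySem.Int.band (n : Int) ((2^b : Nat) : Int) = ((n &&& 2^b : Nat) : Int) :=
      PySem.Int.band_natCast n (2^b)
    have h3 : PySem.Int.band (n : Int) ((4294967295 : Nat) : Int) = ((n &&& 4294967295 : Nat) : Int) :=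
      PySem.Int.band_natCast n 4294967295
    norm_num at h3
    simp only [h2, h3, Int.toNat_natCast, ne_eq, Nat.cast_eq_zero]
    have hm : (4294967295 : Nat) = 2^32 - 1 := by norm_num
    have ht := Nat.and_two_pow n b
    rw [hm, Nat.testBit_and, Nat.testBit_two_pow_sub_one]
    cases h : n.testBit b <;> rw [h] at ht <;> simp [ht, hb]
  · have hneg : ¬ (0 ≤ Int.negSucc n) := of_decide_eq_false rfl
    have e1 : PySem.Int.band (Int.negSucc n) ((2^b : Nat) : Int)
        = (((2^b : Nat) - ((2^b : Nat) &&& n) : Nat) : Int) := by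
      have hcast : ((2:Int))^b = ((2^b : Nat) : Int) := by push_cast; ring
      have htn : ((2:Int)^b).toNat = 2^b := by rw [hcast]; exact Int.toNat_natCast _
      have hle : 2^b &&& n ≤ 2^b := Nat.and_le_left
      simp [PySem.Int.band, hneg, htn]
    have e2 : PySem.Int.band (Int.negSucc n) 4294967295
        = (((4294967295 : Nat) - ((4294967295 : Nat) &&& n) : Nat) : Int) := by
      simp [PySem.Int.band, hneg]
    simp only [e1, e2, Int.toNat_natCast, ne_eq, Nat.cast_eq_zero]
    have hm : (4294967295 : Nat) = 2^32 - 1 := by norm_num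
    rw [hm]
    simp only [pv_sub_and_testBit, Nat.testBit_two_pow_sub_one]
    have ht : 2^b &&& n = (n.testBit b).toNat * 2^b := by
      rw [Nat.and_comm]; exact Nat.and_two_pow n b
    have hp : 0 < 2^b := Nat.two_pow_pos b
    cases h : n.testBit b <;> rw [h] at ht <;> simp [ht, hb] <;> omega

lemma pv_loop_inv (l : List Int) (o t : Nat) (c : Nat → Nat) (hc : ∀ b, c b < 3)
    (h : ∀ b, o.testBit b = (c b == 1) ∧ t.testBit b = (c b == 2)) :
    ∃ o' t' : Nat,
      l.foldl (fun (st : Int × Int) i =>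
        let num := PySem.Int.band i 4294967295
        let twos := PySem.Int.bor st.2 (PySem.Int.band st.1 num)
        let ones := PySem.Int.bxor st.1 num
        let common := Int.not (PySem.Int.band ones twos)
        (PySem.Int.band ones common, PySem.Int.band twos common)) ((o : Int), (t : Int))
        = ((o' : Int), (t' : Int)) ∧
      ∀ b, o'.testBit b = ((c b + pvCnt l b) % 3 == 1) ∧
           t'.testBit b = ((c b + pvCnt l b) % 3 == 2) := by
  induction l generalizing o t c with
  | nil =>
    refine ⟨o, t, rfl, fun b => ?_⟩
    have := (h b)
    have hcb := hc b
    simp only [pvCnt, List.countP_nil, Nat.add_zero, Nat.mod_eq_of_lt hcb]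
    exact this
  | cons i l ih =>
    set m := pvMaskN i with hm
    -- the Nat values of the updated state
    set t1 := t ||| (o &&& m) with ht1
    set o1 := o ^^^ m with ho1
    set o2 := o1 - (o1 &&& (o1 &&& t1)) with ho2
    set t2 := t1 - (t1 &&& (o1 &&& t1)) with ht2
    have step :
        (let num := PySem.Int.band i 4294967295
         let twos := PySem.Int.bor (((o : Int), (t : Int)) : Int × Int).2 (PySem.Int.band (((o : Int), (t : Int)) : Int × Int).1 num)
         let ones := PySem.Int.bxor (((o : Int), (t : Int)) : Int × Int).1 num
         let common := Int.not (PySem.Int.band ones twos)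
         (PySem.Int.band ones common, PySem.Int.band twos common))
        = ((o2 : Int), (t2 : Int)) := by
      simp only [pv_band_mask i, ← hm]
      simp only [PySem.Int.band_natCast, PySem.Int.bor_natCast, PySem.Int.bxor_natCast]
      rw [← ht1, ← ho1]
      simp only [PySem.Int.band_natCast, pv_band_not]
      rw [← ho2, ← ht2]
    have hnew : ∀ b, o2.testBit b = ((c b + (if (pvMaskN i).testBit b then 1 else 0)) % 3 == 1)
        ∧ t2.testBit b = ((c b + (if (pvMaskN i).testBit b then 1 else 0)) % 3 == 2) := by
      intro b
      obtain ⟨hob, htb⟩ := h b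
      have hcb := hc b
      rw [ho2, ht2, pv_sub_and_testBit, pv_sub_and_testBit]
      rw [ho1, ht1]
      simp only [Nat.testBit_and, Nat.testBit_xor, Nat.testBit_or, hob, htb, ← hm]
      rcases (by omega : c b = 0 ∨ c b = 1 ∨ c b = 2) with h0 | h0 | h0 <;>
        rw [h0] <;> cases hmb : m.testBit b <;> simp
    have hlt : ∀ b, (c b + (if (pvMaskN i).testBit b then 1 else 0)) % 3 < 3 := by
      intro b; omega
    obtain ⟨o', t', heq, hbits⟩ := ih o2 t2 _ hlt hnew
    refine ⟨o', t', ?_, ?_⟩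
    · rw [List.foldl_cons, step]; exact heq
    · intro b
      obtain ⟨h1, h2⟩ := hbits b
      have hcount : (((c b + (if (pvMaskN i).testBit b then 1 else 0)) % 3) + pvCnt l b) % 3
          = (c b + pvCnt (i :: l) b) % 3 := by
        have : pvCnt (i :: l) b = pvCnt l b + (if (pvMaskN i).testBit b then 1 else 0) := by
          simp [pvCnt, List.countP_cons]
        rw [this]; omega
      rw [hcount] at h1 h2
      exact ⟨h1, h2⟩

lemma pv_ans_count (l : List Int) (bit : Nat) (a0 : Int) :
    l.foldl (fun ans i =>
      if PySem.Int.band i ((1 : Int) <<< bit) ≠ 0 then ans + 1 else ans) a0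
    = a0 + ((l.countP (fun i => decide (PySem.Int.band i ((1 : Int) <<< bit) ≠ 0)) : Nat) : Int) := by
  induction l generalizing a0 with
  | nil => simp
  | cons i l ih =>
    rw [List.foldl_cons, ih, List.countP_cons]
    by_cases h : PySem.Int.band i ((1 : Int) <<< bit) ≠ 0 <;> simp [h] <;> push_cast <;> ring

lemma pv_res_inv (arr : List Int) (n : Nat) :
    ∃ r : Nat,
      (List.range n).foldl (fun res (bit : Nat) =>
        let ans := arr.foldl (fun ans i =>
          if PySem.Int.band i ((1 : Int) <<< bit) ≠ 0 then ans + 1 else ans) (0 : Int)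
        if PySem.Int.mod ans 3 ≠ 0 then PySem.Int.bor res ((1 : Int) <<< bit) else res) 0
      = ((r : Nat) : Int) ∧
      ∀ b, r.testBit b =
        (decide (b < n) &&
          decide ((arr.countP (fun i => decide (PySem.Int.band i ((1 : Int) <<< b) ≠ 0))) % 3 ≠ 0)) := by
  induction n with
  | zero => exact ⟨0, by simp, by simp⟩
  | succ n ih =>
    obtain ⟨r, hr, hbits⟩ := ih
    rw [List.range_succ, List.foldl_append, hr, List.foldl_cons, List.foldl_nil]
    set cn := arr.countP (fun i => decide (PySem.Int.band i ((1 : Int) <<< n) ≠ 0)) with hcn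
    have hans := pv_ans_count arr n 0
    rw [← hcn] at hans
    simp only [hans, zero_add]
    have hmod : PySem.Int.mod ((cn : Nat) : Int) 3 = (((cn % 3 : Nat) : Nat) : Int) := by
      have := PySem.Int.mod_natCast cn 3
      norm_num at this ⊢
      try exact this
    rw [hmod]
    by_cases h : cn % 3 = 0
    · have : ¬ ((((cn % 3 : Nat)) : Int) ≠ 0) := by simp [h]
      rw [if_neg this]
      refine ⟨r, rfl, fun b => ?_⟩
      rw [hbits b]
      rcases (by omega : b < n ∨ b = n ∨ n < b) with hb | hb | hb
      · simp [hb, Nat.lt_succ_of_lt hb]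
      · subst hb
        rw [hcn] at h
        simp only [ne_eq, decide_not] at h ⊢
        simp [h]
      · simp [Nat.not_lt_of_lt hb, show ¬ (b < n + 1) by omega]
    · have : ((((cn % 3 : Nat)) : Int) ≠ 0) := by
        simp only [ne_eq, Nat.cast_eq_zero]; exact h
      rw [if_pos this]
      refine ⟨r ||| 2 ^ n, ?_, fun b => ?_⟩
      · rw [pv_shift_one]
        exact PySem.Int.bor_natCast r (2 ^ n)
      · rw [Nat.testBit_or, hbits b, Nat.testBit_two_pow]
        rcases (by omega : b < n ∨ b = n ∨ n < b) with hb | hb | hb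
        · simp [hb, Nat.lt_succ_of_lt hb, show ¬ (n = b) by omega]
        · subst hb
          rw [hcn] at h
          simp only [ne_eq, decide_not] at h ⊢
          simp [h]
        · simp [Nat.not_lt_of_lt hb, show ¬ (b < n + 1) by omega, show ¬ (n = b) by omega]

-- ===== VERDICT (by name: the statement is the Claim_ definition above) =====
theorem triple_trouble_spec : Claim_equal_triple_trouble := by
  intro arr _
  unfold Spec_triple_trouble triple_trouble triple_trouble_alt
  obtain ⟨rA, hA, hAbits⟩ := pv_res_inv arr 32
  obtain ⟨o', t', hB, hBbits⟩ :=
    pv_loop_inv arr 0 0 (fun _ => 0) (fun _ => by norm_num) (fun b => by simp)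
  rw [hA]
  have h0 : ((0 : Nat) : Int) = (0 : Int) := rfl
  rw [show ((0 : Int), (0 : Int)) = (((0 : Nat) : Int), ((0 : Nat) : Int)) from rfl, hB]
  simp only
  have hfin : PySem.Int.band (PySem.Int.bor ((o' : Nat) : Int) ((t' : Nat) : Int)) 4294967295
      = (((o' ||| t') &&& 4294967295 : Nat) : Int) := by
    rw [PySem.Int.bor_natCast]
    have := PySem.Int.band_natCast (o' ||| t') 4294967295
    norm_num at this ⊢
    exact this
  rw [hfin]
  congr 1
  apply Nat.eq_of_testBit_eq
  intro b
  rw [hAbits b, Nat.testBit_and, Nat.testBit_or,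
    show (4294967295 : Nat) = 2 ^ 32 - 1 from by norm_num, Nat.testBit_two_pow_sub_one]
  obtain ⟨hob, htb⟩ := hBbits b
  rw [hob, htb]
  simp only [Nat.zero_add]
  by_cases hb : b < 32
  · have hcong : arr.countP (fun i => decide (PySem.Int.band i ((1 : Int) <<< b) ≠ 0))
        = pvCnt arr b := by
      unfold pvCnt
      apply List.countP_congr
      intro i _
      rw [pv_maskN_testBit i b hb]
    rw [hcong]
    have h3 := Nat.mod_lt (pvCnt arr b) (show 0 < 3 by norm_num)
    rcases (by omega : pvCnt arr b % 3 = 0 ∨ pvCnt arr b % 3 = 1 ∨ pvCnt arr b % 3 = 2)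
      with h | h | h <;> simp [h, hb]
  · simp [hb]
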